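-- pv_equiv track=rewrite | github.com/AlexandrKhastlienko/EducationPython | Filling.py | recurse
-- ===== SOURCE A (Python) =====
-- def recurse(n, m):
--     matrix = [[max(m, n)] * m for i in range(n)]
--
--     for i in range(n):
--         num = (i % m) + 1
--         for j in range(m):
--             matrix[i][j] = num
--             num += 1
--             if num > m:
--                 num = 1
--
--     return "\n".join(" ".join(str(x) for x in row) for row in matrix)
-- ===== SOURCE B (Python) =====
-- def recurse(n, m):
--     if n <= 0:
--         return ""
--     base = list(range(1, m + 1))
--     return "\n".join(
--         " ".join(map(str, base[i % m:] + base[:i % m])) for i in range(n)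
--     )
-- ===== Notes on version B (the rewrite author's own statement) =====
-- stated objective: simpler
-- what changed: Replaces the per-cell incremental filling with wrap-around (preallocate an n x m matrix, then mutate every cell while threading a counter) by precomputing base = [1..m] once and emitting each row as the slice rotation base[i%m:] + base[:i%m], joined directly into the output string.
import Mathlib
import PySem

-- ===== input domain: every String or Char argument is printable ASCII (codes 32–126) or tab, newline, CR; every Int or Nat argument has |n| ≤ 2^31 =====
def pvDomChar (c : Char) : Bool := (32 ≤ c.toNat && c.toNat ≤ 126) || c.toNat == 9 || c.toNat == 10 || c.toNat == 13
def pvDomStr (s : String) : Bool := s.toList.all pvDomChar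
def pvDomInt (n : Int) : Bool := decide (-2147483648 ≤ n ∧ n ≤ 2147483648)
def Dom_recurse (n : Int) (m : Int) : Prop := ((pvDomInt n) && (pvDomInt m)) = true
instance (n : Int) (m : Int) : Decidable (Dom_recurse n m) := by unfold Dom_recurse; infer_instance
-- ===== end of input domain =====

-- B replaces A's per-cell incremental filling (preallocated matrix mutated cell by cell
-- while threading a wrap-around counter) by building base = [1..m] once and emitting each
-- row as the slice rotation base[i%m:] + base[:i%m]; objective: simpler.

-- ===== PORT A =====
-- inner loop body: matrix[i][j] = num; num += 1; if num > m: num = 1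
def innerStepA (m : Int) (st : List Int × Int) (j : Int) : List Int × Int :=
  let row := PySem.List.pySetD st.1 j st.2
  let num := st.2 + 1
  (row, if num > m then 1 else num)

-- for j in range(m): … , starting from row r and counter num
def fillRowA (m : Int) (r : List Int) (num : Int) : List Int × Int :=
  (PySem.List.pyRange 0 m 1).foldl (innerStepA m) (r, num)

-- one iteration of the outer loop: rewrite row i of the matrix
def stepA (m : Int) (mat : List (List Int)) (i : Int) : List (List Int) :=
  PySem.List.pySetD mat i
    (fillRowA m (PySem.List.pyGetD mat i []) (PySem.Int.mod i m + 1)).1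

def recurse (n : Int) (m : Int) : String :=
  let matrix0 := (PySem.List.pyRange 0 n 1).map (fun _ => PySem.List.pyRepeat [max m n] m)
  let matrix := (PySem.List.pyRange 0 n 1).foldl (stepA m) matrix0
  PySem.Str.join "\n" (matrix.map (fun row => PySem.Str.join " " (row.map PySem.Int.toStr)))

-- ===== PORT B =====
def recurse_alt (n : Int) (m : Int) : String :=
  if n ≤ 0 then "" else
  let base := PySem.List.pyRange 1 (m + 1) 1
  PySem.Str.join "\n" ((PySem.List.pyRange 0 n 1).map (fun i =>
    PySem.Str.join " "
      ((PySem.List.slice base (some (PySem.Int.mod i m)) none ++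
        PySem.List.slice base none (some (PySem.Int.mod i m))).map PySem.Int.toStr)))

-- ===== PRECONDITION & SPEC =====
-- Pre_ excludes exactly the inputs where Python A raises ZeroDivisionError (i % m with
-- m = 0, reached only when the outer loop runs, i.e. n > 0); B raises there too.
def Pre_recurse (n : Int) (m : Int) : Prop := 0 < n → m ≠ 0
instance (n : Int) (m : Int) : Decidable (Pre_recurse n m) := by unfold Pre_recurse; infer_instance
def pvWitness_recurse : Int × Int := (3, 4)

def Spec_recurse (n : Int) (m : Int) (out : String) : Prop := out = recurse_alt n m
instance (n : Int) (m : Int) (out : String) : Decidable (Spec_recurse n m out) := by unfold Spec_recurse; infer_instance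

-- ===== CLAIM (what is proved, stated in full; the proofs are below) =====
def Claim_equal_recurse : Prop := ∀ (n : Int) (m : Int), Dom_recurse n m → Pre_recurse n m → Spec_recurse n m (recurse n m)

-- ===== LEMMAS AND PROOFS =====

-- value sitting in cell j of a row whose counter started at k+1 (0 ≤ k < m)
def valAt (m k j : Int) : Int := if k + j < m then k + j + 1 else k + j - m + 1

-- B's rotated row, written with ranges: [k+1 … m] ++ [1 … k]
def tRow (m k : Int) : List Int :=
  PySem.List.pyRange (k+1) (m+1) 1 ++ PySem.List.pyRange 1 (k+1) 1

lemma tRow_length (m k : Int) (h0 : 0 ≤ k) (hk : k < m) : (tRow m k).length = m.toNat := by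
  simp [tRow, PySem.List.length_pyRange_one]; omega

lemma take_succ_set {α : Type} (r : List α) (i : Nat) (v : α) (h : i < r.length) :
    (r.set i v).take (i+1) = r.take i ++ [v] := by
  apply List.ext_getElem
  · simp; omega
  · intro k hk1 hk2
    simp at hk1
    rcases Nat.lt_or_ge k i with hki | hki
    · have h2 : k < (List.take i r).length := by simp; omega
      rw [List.getElem_take, List.getElem_set, List.getElem_append_left h2, List.getElem_take]
      simp [Nat.ne_of_gt hki]
    · have hki' : k = i := by omega
      subst hki'
      have h2 : (List.take k r).length = k := by simp; omega
      rw [List.getElem_take, List.getElem_set]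
      rw [List.getElem_append_right (by omega)]
      simp [h2]

lemma tRow_getD (m k : Int) (j : Nat) (h0 : 0 ≤ k) (hk : k < m) (hj : (j:Int) < m) :
    (tRow m k).getD j 0 = valAt m k (j:Int) := by
  unfold tRow valAt
  rcases lt_or_ge (j:Int) (m - k) with h | h
  · have hlen : j < (PySem.List.pyRange (k+1) (m+1) 1).length := by
      rw [PySem.List.length_pyRange_one]; omega
    rw [List.getD_append _ _ _ _ hlen, List.getD_eq_getElem _ _ hlen,
        PySem.List.getElem_pyRange_one]
    split_ifs with hc
    · omega
    · omega
  · have hlen : (PySem.List.pyRange (k+1) (m+1) 1).length ≤ j := by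
      rw [PySem.List.length_pyRange_one]; omega
    rw [List.getD_append_right _ _ _ _ hlen]
    have hlen2 : j - (PySem.List.pyRange (k+1) (m+1) 1).length <
        (PySem.List.pyRange 1 (k+1) 1).length := by
      simp only [PySem.List.length_pyRange_one] at *; omega
    rw [List.getD_eq_getElem _ _ hlen2, PySem.List.getElem_pyRange_one]
    simp only [PySem.List.length_pyRange_one]
    split_ifs with hc
    · omega
    · omega

lemma fill_inv (m k : Int) (hm : 0 < m) (h0 : 0 ≤ k) (hk : k < m) :
    ∀ (c : Nat) (j : Int), 0 ≤ j → j ≤ m → (m - j).toNat = c →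
    ∀ (r : List Int), r.length = m.toNat →
    ((PySem.List.pyRange j m 1).foldl (innerStepA m) (r, valAt m k j)).1
      = r.take j.toNat ++ (tRow m k).drop j.toNat := by
  intro c
  induction c with
  | zero =>
    intro j hj0 hjm hc r hr
    have hjm' : j = m := by omega
    rw [PySem.List.pyRange_one_eq_nil (by omega)]
    have h1 : r.take j.toNat = r := List.take_of_length_le (by omega)
    have h2 : (tRow m k).drop j.toNat = [] :=
      List.drop_of_length_le (by rw [tRow_length m k h0 hk]; omega)
    simp [h1, h2]
  | succ c ih =>
    intro j hj0 hjm hc r hr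
    have hjlt : j < m := by omega
    rw [PySem.List.pyRange_one_cons hjlt]
    rw [List.foldl_cons]
    have hstep : innerStepA m (r, valAt m k j) j
        = (r.set j.toNat (valAt m k j), valAt m k (j+1)) := by
      unfold innerStepA
      rw [PySem.List.pySetD_of_nonneg _ _ hj0]
      simp only [valAt]
      congr 1
      split_ifs <;> omega
    rw [hstep]
    rw [ih (j+1) (by omega) (by omega) (by omega) _ (by simp [hr])]
    have hjr : j.toNat < r.length := by omega
    have h1 : (j+1).toNat = j.toNat + 1 := by omega
    rw [h1, take_succ_set r j.toNat (valAt m k j) hjr]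
    have hjt : j.toNat < (tRow m k).length := by rw [tRow_length m k h0 hk]; omega
    rw [List.drop_eq_getElem_cons hjt]
    rw [← List.getD_eq_getElem (tRow m k) 0 hjt, tRow_getD m k j.toNat h0 hk (by omega)]
    have : ((j.toNat : Int)) = j := by omega
    rw [this]
    simp

lemma fillRowA_eq (m k : Int) (hm : 0 < m) (h0 : 0 ≤ k) (hk : k < m)
    (r : List Int) (hr : r.length = m.toNat) :
    (fillRowA m r (k+1)).1 = tRow m k := by
  have hval : valAt m k 0 = k + 1 := by unfold valAt; split_ifs <;> omega
  have := fill_inv m k hm h0 hk m.toNat 0 (by omega) (by omega) (by omega) r hr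
  rw [hval] at this
  unfold fillRowA
  simpa using this

lemma outer_inv (n m : Int) :
    ∀ (c : Nat) (a : Int), 0 ≤ a → (n - a).toNat = c →
    ∀ (mat : List (List Int)), mat.length = n.toNat →
    (PySem.List.pyRange a n 1).foldl (stepA m) mat
      = mat.take a.toNat ++ (PySem.List.pyRange a n 1).map
          (fun i => (fillRowA m (PySem.List.pyGetD mat i []) (PySem.Int.mod i m + 1)).1) := by
  intro c
  induction c with
  | zero =>
    intro a ha hc mat hmat
    rw [PySem.List.pyRange_one_eq_nil (by omega)]
    simp [List.take_of_length_le (by omega : mat.length ≤ a.toNat)]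
  | succ c ih =>
    intro a ha hc mat hmat
    have halt : a < n := by omega
    rw [PySem.List.pyRange_one_cons halt]
    rw [List.foldl_cons, List.map_cons]
    have hsa : stepA m mat a
        = mat.set a.toNat (fillRowA m (PySem.List.pyGetD mat a []) (PySem.Int.mod a m + 1)).1 := by
      unfold stepA
      rw [PySem.List.pySetD_of_nonneg _ _ ha]
    rw [hsa]
    rw [ih (a+1) (by omega) (by omega) _ (by simp [hmat])]
    have hmap : (PySem.List.pyRange (a+1) n 1).map
          (fun i => (fillRowA m (PySem.List.pyGetD
              (mat.set a.toNat (fillRowA m (PySem.List.pyGetD mat a []) (PySem.Int.mod a m + 1)).1)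
              i []) (PySem.Int.mod i m + 1)).1)
        = (PySem.List.pyRange (a+1) n 1).map
          (fun i => (fillRowA m (PySem.List.pyGetD mat i []) (PySem.Int.mod i m + 1)).1) := by
      apply List.map_congr_left
      intro i hi
      rw [PySem.List.mem_pyRange_one] at hi
      have hi0 : 0 ≤ i := by omega
      have hilen : i.toNat < mat.length := by omega
      have hilen' : i.toNat < (mat.set a.toNat (fillRowA m (PySem.List.pyGetD mat a [])
          (PySem.Int.mod a m + 1)).1).length := by simp [hilen]
      rw [PySem.List.pyGetD_eq_getElem _ _ hi0 (by simp; omega),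
          PySem.List.pyGetD_eq_getElem _ _ hi0 (by omega)]
      rw [List.getElem_set_ne (by omega)]
    rw [hmap]
    have halen : a.toNat < mat.length := by omega
    have h1 : (a+1).toNat = a.toNat + 1 := by omega
    rw [h1, take_succ_set mat a.toNat _ halen]
    simp

lemma rowB_eq_tRow (m k : Int) (h0 : 0 ≤ k) (hk : k < m) :
    PySem.List.slice (PySem.List.pyRange 1 (m + 1) 1) (some k) none ++
      PySem.List.slice (PySem.List.pyRange 1 (m + 1) 1) none (some k) = tRow m k := by
  rw [PySem.List.slice_from _ h0, PySem.List.slice_to _ h0]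
  rw [PySem.List.pyRange_one_append 1 (1+k) (m+1) (by omega) (by omega)]
  have hlen : (PySem.List.pyRange 1 (1+k) 1).length = k.toNat := by
    rw [PySem.List.length_pyRange_one]; omega
  rw [← hlen, List.drop_left, List.take_left]
  unfold tRow
  have h1 : 1 + k = k + 1 := by omega
  rw [h1]

theorem recurse_eq_alt (n m : Int) (hpre : Pre_recurse n m) : recurse n m = recurse_alt n m := by
  simp only [recurse, recurse_alt]
  rcases (by omega : n ≤ 0 ∨ 0 < n) with hn | hn
  · rw [PySem.List.pyRange_one_eq_nil (by omega), if_pos hn]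
    simp [PySem.Str.join]
  · rw [if_neg (by omega)]
    have hm : m ≠ 0 := hpre hn
    have hmat0 : ((PySem.List.pyRange 0 n 1).map
        (fun _ => PySem.List.pyRepeat [max m n] m)).length = n.toNat := by
      rw [List.length_map, PySem.List.length_pyRange_one]; omega
    rw [outer_inv n m n.toNat 0 (by omega) (by omega) _ hmat0]
    simp only [Int.toNat_zero, List.take_zero, List.nil_append, List.map_map]
    apply congrArg
    apply List.map_congr_left
    intro i hi
    rw [PySem.List.mem_pyRange_one] at hi
    simp only [Function.comp]
    apply congrArg
    apply congrArg
    rw [PySem.List.pyGetD_map_pyRange_of_nonneg _ _ _ _ hi.1 hi.2]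
    rw [PySem.List.pyRepeat_singleton]
    rcases lt_or_gt_of_ne hm with hneg | hpos
    · -- m < 0: empty rows on both sides
      have hmt : m.toNat = 0 := by omega
      rw [hmt, List.replicate_zero]
      unfold fillRowA
      rw [PySem.List.pyRange_one_eq_nil (by omega)]
      rw [PySem.List.pyRange_one_eq_nil (by omega : m + 1 ≤ 1)]
      simp [PySem.List.slice]
    · -- m > 0: both rows are the rotation tRow m (i % m)
      have hk0 : 0 ≤ PySem.Int.mod i m := PySem.Int.mod_nonneg i hpos
      have hkm : PySem.Int.mod i m < m := PySem.Int.mod_lt i hpos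
      rw [fillRowA_eq m (PySem.Int.mod i m) hpos hk0 hkm _ (by simp)]
      rw [rowB_eq_tRow m (PySem.Int.mod i m) hk0 hkm]

-- ===== VERDICT (by name: the statement is the Claim_ definition above) =====
theorem recurse_spec : Claim_equal_recurse := by
  intro n m _ hpre
  unfold Spec_recurse
  exact recurse_eq_alt n m hpre
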